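-- pv_equiv track=rewrite | github.com/yellalinghmargonda-photon/python | backtracking/daignally.py | paths
-- ===== SOURCE A (Python) =====
-- def paths(p, r, c):
--     if r == 1 and c == 1:
--         return [p]
--
--     path_list = []
--     if r > 1:
--         path_list.extend(paths(p + 'V', r - 1, c))
--     if c > 1 and r>1:
--         path_list.extend(paths(p + 'D', r-1, c - 1))
--     if c > 1:
--         path_list.extend(paths(p + 'H', r, c - 1))
--
--     return path_list
-- ===== SOURCE B (Python) =====
-- def paths(p, r, c):
--     out = []
--     stack = [(p, r, c)]
--     while stack:
--         q, rr, cc = stack.pop()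
--         if rr == 1 and cc == 1:
--             out.append(q)
--             continue
--         if cc > 1:
--             stack.append((q + 'H', rr, cc - 1))
--         if cc > 1 and rr > 1:
--             stack.append((q + 'D', rr - 1, cc - 1))
--         if rr > 1:
--             stack.append((q + 'V', rr - 1, cc))
--     return out
-- ===== Notes on version B (the rewrite author's own statement) =====
-- stated objective: alternative
-- what changed: Replaces the recursive tree enumeration by an iterative DFS over an explicit stack of (prefix, r, c) triples, pushing children in reverse order so leaves are appended to a single output list in the same preorder; Pre_ excludes inputs near CPython's recursion limit, where A raises RecursionError.
-- outside the precondition, e.g. on paths('', 0, 902): A returns [], B returns []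
import Mathlib
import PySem

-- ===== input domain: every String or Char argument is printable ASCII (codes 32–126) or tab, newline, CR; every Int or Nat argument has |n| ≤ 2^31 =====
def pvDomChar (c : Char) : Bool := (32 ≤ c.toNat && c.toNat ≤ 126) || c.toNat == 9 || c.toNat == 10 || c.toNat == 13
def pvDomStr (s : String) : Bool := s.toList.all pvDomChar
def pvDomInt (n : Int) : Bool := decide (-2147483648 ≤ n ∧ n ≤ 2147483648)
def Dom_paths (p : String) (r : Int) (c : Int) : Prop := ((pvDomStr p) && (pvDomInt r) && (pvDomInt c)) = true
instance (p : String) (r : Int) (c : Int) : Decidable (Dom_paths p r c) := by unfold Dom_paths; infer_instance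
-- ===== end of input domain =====

-- B replaces A's recursion by an iterative DFS with an explicit stack (same output order); objective: alternative.


-- ===== PORT A =====
def paths (p : String) (r : Int) (c : Int) : List String :=
  if r = 1 ∧ c = 1 then [p]
  else
    (if r > 1 then paths (p ++ "V") (r - 1) c else []) ++
    (if c > 1 ∧ r > 1 then paths (p ++ "D") (r - 1) (c - 1) else []) ++
    (if c > 1 then paths (p ++ "H") r (c - 1) else [])
termination_by r.toNat + c.toNat
decreasing_by all_goals omega

-- ===== PORT B =====
-- weight of a stack node / of a stack, used only for termination of the stack loop
def pvNodeW (t : String × Int × Int) : Nat := 4 ^ (t.2.1.toNat + t.2.2.toNat)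
def pvStackW (s : List (String × Int × Int)) : Nat := (s.map pvNodeW).sum

theorem pvStackW_append (a b : List (String × Int × Int)) :
    pvStackW (a ++ b) = pvStackW a + pvStackW b := by simp [pvStackW]

-- popping a node and pushing its children strictly decreases the stack weight
theorem pvStackW_children_lt (q : String) (rr cc : Int) (rest : List (String × Int × Int)) :
    pvStackW ((if rr > 1 then [(q ++ "V", rr - 1, cc)] else []) ++
              (if cc > 1 ∧ rr > 1 then [(q ++ "D", rr - 1, cc - 1)] else []) ++
              (if cc > 1 then [(q ++ "H", rr, cc - 1)] else []) ++ rest)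
      < pvStackW ((q, rr, cc) :: rest) := by
  rw [pvStackW_append, pvStackW_append, pvStackW_append]
  have hone : pvStackW ((q, rr, cc) :: rest) = 4 ^ (rr.toNat + cc.toNat) + pvStackW rest := by
    simp [pvStackW, pvNodeW]
  rw [hone]
  by_cases hr : rr > 1 <;> by_cases hc : cc > 1
  · -- three children, exponents m+1, m, m+1 against m+2
    obtain ⟨m, hD⟩ : ∃ m, (rr - 1).toNat + (cc - 1).toNat = m := ⟨_, rfl⟩
    have hV : (rr - 1).toNat + cc.toNat = m + 1 := by omega
    have hH : rr.toNat + (cc - 1).toNat = m + 1 := by omega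
    have hn : rr.toNat + cc.toNat = m + 2 := by omega
    simp only [if_pos hr, if_pos hc, if_pos (And.intro hc hr), pvStackW, pvNodeW,
      List.map_cons, List.map_nil, List.sum_cons, List.sum_nil]
    rw [hV, hH, hn, hD]
    have hp : 0 < (4 : Nat) ^ m := Nat.pow_pos (by norm_num : 0 < (4:Nat))
    have h1 : (4 : Nat) ^ (m + 1) = 4 ^ m * 4 := by ring
    have h2 : (4 : Nat) ^ (m + 2) = 4 ^ m * 16 := by ring
    omega
  · obtain ⟨m, hD⟩ : ∃ m, (rr - 1).toNat + cc.toNat = m := ⟨_, rfl⟩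
    have hn : rr.toNat + cc.toNat = m + 1 := by omega
    simp only [if_pos hr, if_neg (show ¬(cc > 1 ∧ rr > 1) by tauto), if_neg hc, pvStackW, pvNodeW,
      List.map_cons, List.map_nil, List.sum_cons, List.sum_nil]
    rw [hn, hD]
    have hp : 0 < (4 : Nat) ^ m := Nat.pow_pos (by norm_num : 0 < (4:Nat))
    have h1 : (4 : Nat) ^ (m + 1) = 4 ^ m * 4 := by ring
    omega
  · obtain ⟨m, hD⟩ : ∃ m, rr.toNat + (cc - 1).toNat = m := ⟨_, rfl⟩
    have hn : rr.toNat + cc.toNat = m + 1 := by omega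
    simp only [if_neg hr, if_neg (show ¬(cc > 1 ∧ rr > 1) by tauto), if_pos hc, pvStackW, pvNodeW,
      List.map_cons, List.map_nil, List.sum_cons, List.sum_nil]
    rw [hn, hD]
    have hp : 0 < (4 : Nat) ^ m := Nat.pow_pos (by norm_num : 0 < (4:Nat))
    have h1 : (4 : Nat) ^ (m + 1) = 4 ^ m * 4 := by ring
    omega
  · simp only [if_neg hr, if_neg (show ¬(cc > 1 ∧ rr > 1) by tauto), if_neg hc, pvStackW,
      List.map_nil, List.sum_nil]
    have hp : 0 < (4 : Nat) ^ (rr.toNat + cc.toNat) := Nat.pow_pos (by norm_num : 0 < (4:Nat))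
    omega

-- the while loop of Source B: pop the head; a leaf is appended to out; otherwise the
-- children are pushed H, D, V so that V ends on top (head of the list)
def pathsLoop (stack : List (String × Int × Int)) (out : List String) : List String :=
  match stack with
  | [] => out
  | (q, rr, cc) :: rest =>
    if rr = 1 ∧ cc = 1 then pathsLoop rest (out ++ [q])
    else
      pathsLoop ((if rr > 1 then [(q ++ "V", rr - 1, cc)] else []) ++
                 (if cc > 1 ∧ rr > 1 then [(q ++ "D", rr - 1, cc - 1)] else []) ++
                 (if cc > 1 then [(q ++ "H", rr, cc - 1)] else []) ++ rest) out
termination_by pvStackW stack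
decreasing_by
  · have hp : 0 < pvNodeW (q, rr, cc) := Nat.pow_pos (by norm_num : 0 < (4:Nat))
    simp only [pvStackW, List.map_cons, List.sum_cons]
    omega
  · exact pvStackW_children_lt q rr cc rest

def paths_alt (p : String) (r : Int) (c : Int) : List String :=
  pathsLoop [(p, r, c)] []

-- ===== PRECONDITION & SPEC =====
-- Pre_ excludes inputs whose longest move sequence approaches CPython's recursion limit (~1000 frames),
-- where the recursive A raises RecursionError; a safety margin of 900 is used because the exact
-- threshold depends on how many frames are already on the interpreter stack.
def Pre_paths (p : String) (r : Int) (c : Int) : Prop := max r 1 + max c 1 ≤ 900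
instance (p : String) (r : Int) (c : Int) : Decidable (Pre_paths p r c) := by unfold Pre_paths; infer_instance
def pvWitness_paths : String × Int × Int := ("", 2, 3)

def Spec_paths (p : String) (r : Int) (c : Int) (out : List String) : Prop := out = paths_alt p r c
instance (p : String) (r : Int) (c : Int) (out : List String) : Decidable (Spec_paths p r c out) := by unfold Spec_paths; infer_instance

-- ===== CLAIM (what is proved, stated in full; the proofs are below) =====
def Claim_equal_paths : Prop := ∀ (p : String) (r : Int) (c : Int), Dom_paths p r c → Pre_paths p r c → Spec_paths p r c (paths p r c)

-- ===== LEMMAS AND PROOFS =====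
theorem pathsLoop_nil (out : List String) : pathsLoop [] out = out := by
  rw [pathsLoop]

-- loop invariant: processing the top node emits exactly A's list for that node
theorem pathsLoop_cons (n : Nat) : ∀ (p : String) (r c : Int), r.toNat + c.toNat = n →
    ∀ (rest : List (String × Int × Int)) (out : List String),
    pathsLoop ((p, r, c) :: rest) out = pathsLoop rest (out ++ paths p r c) := by
  induction n using Nat.strong_induction_on with
  | _ n ih =>
    intro p r c hn rest out
    rw [pathsLoop, paths]
    by_cases hb : r = 1 ∧ c = 1
    · simp [hb]
    · rw [if_neg hb, if_neg hb]
      by_cases hr : r > 1 <;> by_cases hc : c > 1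
      · rw [if_pos hr, if_pos hr, if_pos hc, if_pos (And.intro hc hr), if_pos (And.intro hc hr)]
        simp only [List.cons_append, List.nil_append]
        rw [ih ((r - 1).toNat + c.toNat) (by omega) _ _ _ rfl _ _,
            ih ((r - 1).toNat + (c - 1).toNat) (by omega) _ _ _ rfl _ _,
            ih (r.toNat + (c - 1).toNat) (by omega) _ _ _ rfl _ _]
        simp [hc]
      · rw [if_pos hr, if_pos hr, if_neg hc, if_neg hc,
            if_neg (show ¬(c > 1 ∧ r > 1) by tauto), if_neg (show ¬(c > 1 ∧ r > 1) by tauto)]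
        simp only [List.cons_append, List.nil_append, List.append_nil]
        rw [ih ((r - 1).toNat + c.toNat) (by omega) _ _ _ rfl _ _]
      · rw [if_neg hr, if_neg hr, if_pos hc, if_pos hc,
            if_neg (show ¬(c > 1 ∧ r > 1) by tauto), if_neg (show ¬(c > 1 ∧ r > 1) by tauto)]
        simp only [List.cons_append, List.nil_append]
        rw [ih (r.toNat + (c - 1).toNat) (by omega) _ _ _ rfl _ _]
      · rw [if_neg hr, if_neg hr, if_neg hc, if_neg hc,
            if_neg (show ¬(c > 1 ∧ r > 1) by tauto), if_neg (show ¬(c > 1 ∧ r > 1) by tauto)]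
        simp

-- ===== VERDICT (by name: the statement is the Claim_ definition above) =====
theorem paths_spec : Claim_equal_paths := by
  intro p r c _ _
  unfold Spec_paths paths_alt
  rw [pathsLoop_cons (r.toNat + c.toNat) p r c rfl [] [], pathsLoop_nil]
  simp
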